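-- pv_equiv track=rewrite | github.com/chizoalban2003-beep/Ludometrics-AI-Ethics | generate_ludo_dataset.py | _count_token_states
-- ===== SOURCE A (Python) =====
-- from typing import List, Tuple
--
-- FINISH_POS = 57
--
-- def _count_token_states(tokens: List[int]) -> Tuple[int, int, int]:
--     home = 0
--     active = 0
--     finished = 0
--     for pos in tokens:
--         if pos == 0:
--             home += 1
--         elif pos == FINISH_POS:
--             finished += 1
--         else:
--             active += 1
--     return home, active, finished
-- ===== SOURCE B (Python) =====
-- from typing import List, Tuple
--
-- FINISH_POS = 57
--
-- def _count_token_states(tokens: List[int]) -> Tuple[int, int, int]: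
--     # Divide and conquer: count the halves recursively and add the triples.
--     n = len(tokens)
--     if n == 0:
--         return (0, 0, 0)
--     if n == 1:
--         p = tokens[0]
--         if p == 0:
--             return (1, 0, 0)
--         if p == FINISH_POS:
--             return (0, 0, 1)
--         return (0, 1, 0)
--     mid = n // 2
--     h1, a1, f1 = _count_token_states(tokens[:mid])
--     h2, a2, f2 = _count_token_states(tokens[mid:])
--     return (h1 + h2, a1 + a2, f1 + f2)
-- ===== Notes on version B (the rewrite author's own statement) =====
-- stated objective: alternative
-- what changed: Replaced A's single accumulating branch loop by a divide-and-conquer recursion: split the list in half, count each half recursively, and add the resulting (home, active, finished) triples componentwise.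
import Mathlib
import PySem

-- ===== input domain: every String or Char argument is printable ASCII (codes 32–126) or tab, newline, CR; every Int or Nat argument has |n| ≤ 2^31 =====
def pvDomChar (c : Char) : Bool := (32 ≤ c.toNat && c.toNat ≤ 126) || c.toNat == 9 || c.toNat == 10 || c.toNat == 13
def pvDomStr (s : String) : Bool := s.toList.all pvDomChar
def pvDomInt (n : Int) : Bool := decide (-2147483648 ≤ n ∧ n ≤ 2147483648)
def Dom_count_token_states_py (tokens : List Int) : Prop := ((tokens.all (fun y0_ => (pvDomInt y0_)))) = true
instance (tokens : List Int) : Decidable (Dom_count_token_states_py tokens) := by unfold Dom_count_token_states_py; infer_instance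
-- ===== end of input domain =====

-- B replaces A's single accumulating branch loop by a divide-and-conquer recursion on halves; objective: alternative.

-- ===== PORT A =====
def FINISH_POS : Int := 57

def count_token_states_py (tokens : List Int) : Int × Int × Int :=
  tokens.foldl
    (fun (s : Int × Int × Int) pos =>
      if pos = 0 then (s.1 + 1, s.2.1, s.2.2)
      else if pos = FINISH_POS then (s.1, s.2.1, s.2.2 + 1)
      else (s.1, s.2.1 + 1, s.2.2))
    (0, 0, 0)

-- ===== PORT B =====
def count_token_states_py_alt (tokens : List Int) : Int × Int × Int :=
  match h : tokens with
  | [] => (0, 0, 0)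
  | [p] =>
    if p = 0 then (1, 0, 0)
    else if p = FINISH_POS then (0, 0, 1)
    else (0, 1, 0)
  | _ :: _ :: _ =>
    let n := tokens.length
    let mid := n / 2
    let (h1, a1, f1) := count_token_states_py_alt (tokens.take mid)
    let (h2, a2, f2) := count_token_states_py_alt (tokens.drop mid)
    (h1 + h2, a1 + a2, f1 + f2)
termination_by tokens.length
decreasing_by
  · subst h; simp [List.length_take]; omega
  · subst h; simp; omega

-- ===== PRECONDITION & SPEC =====
def Spec_count_token_states_py (tokens : List Int) (out : Int × Int × Int) : Prop := out = count_token_states_py_alt tokens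
instance (tokens : List Int) (out : Int × Int × Int) : Decidable (Spec_count_token_states_py tokens out) := by unfold Spec_count_token_states_py; infer_instance

-- ===== CLAIM (what is proved, stated in full; the proofs are below) =====
def Claim_equal_count_token_states_py : Prop := ∀ (tokens : List Int), Dom_count_token_states_py tokens → Spec_count_token_states_py tokens (count_token_states_py tokens)

-- ===== LEMMAS AND PROOFS =====

-- the common characterisation both ports compute
def triple (l : List Int) : Int × Int × Int :=
  ((l.count 0 : Int), (l.length : Int) - l.count 0 - l.count FINISH_POS, (l.count FINISH_POS : Int))

theorem foldA_eq (tokens : List Int) (h a f : Int) :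
    tokens.foldl
      (fun (s : Int × Int × Int) pos =>
        if pos = 0 then (s.1 + 1, s.2.1, s.2.2)
        else if pos = FINISH_POS then (s.1, s.2.1, s.2.2 + 1)
        else (s.1, s.2.1 + 1, s.2.2))
      (h, a, f)
    = (h + tokens.count 0, a + ((tokens.length : Int) - tokens.count 0 - tokens.count FINISH_POS), f + tokens.count FINISH_POS) := by
  induction tokens generalizing h a f with
  | nil => simp
  | cons x xs ih =>
    simp only [List.foldl_cons]
    split_ifs with h1 h2
    · rw [ih]; subst h1
      simp [FINISH_POS, Prod.ext_iff]
      omega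
    · rw [ih]; subst h2
      simp [FINISH_POS, Prod.ext_iff] at h1 ⊢
      omega
    · rw [ih]
      simp [h1, h2, Prod.ext_iff]
      omega

theorem triple_append (l1 l2 : List Int) :
    triple (l1 ++ l2) = (((triple l1).1 + (triple l2).1, (triple l1).2.1 + (triple l2).2.1,
      (triple l1).2.2 + (triple l2).2.2) : Int × Int × Int) := by
  simp [triple, List.count_append, Prod.ext_iff]
  omega

theorem altB_aux (n : Nat) : ∀ (tokens : List Int), tokens.length ≤ n →
    count_token_states_py_alt tokens = triple tokens := by
  induction n with
  | zero =>
    intro tokens hlen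
    have : tokens = [] := List.eq_nil_of_length_eq_zero (Nat.le_zero.mp hlen)
    subst this
    simp [count_token_states_py_alt, triple]
  | succ n ih =>
    intro tokens hlen
    match tokens with
    | [] => simp [count_token_states_py_alt, triple]
    | [p] =>
      rcases eq_or_ne p 0 with h0 | h0 <;> rcases eq_or_ne p 57 with h5 | h5 <;>
        simp [count_token_states_py_alt, triple, FINISH_POS, h0, h5, List.count_cons] <;> omega
    | x :: y :: rest =>
      rw [count_token_states_py_alt]
      simp only []
      have hm1 : ((x :: y :: rest).take ((x :: y :: rest).length / 2)).length ≤ n := by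
        simp at hlen ⊢; omega
      have hm2 : ((x :: y :: rest).drop ((x :: y :: rest).length / 2)).length ≤ n := by
        simp at hlen ⊢; omega
      rw [ih _ hm1, ih _ hm2]
      have h := triple_append ((x :: y :: rest).take ((x :: y :: rest).length / 2))
        ((x :: y :: rest).drop ((x :: y :: rest).length / 2))
      rw [List.take_append_drop] at h
      rw [h]

theorem altB_eq (tokens : List Int) : count_token_states_py_alt tokens = triple tokens :=
  altB_aux tokens.length tokens (le_refl _)

-- ===== VERDICT (by name: the statement is the Claim_ definition above) =====
theorem count_token_states_py_spec : Claim_equal_count_token_states_py := by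
  intro tokens _
  unfold Spec_count_token_states_py
  rw [altB_eq, count_token_states_py, foldA_eq]
  simp [triple]
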